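-- pv_equiv track=rewrite | github.com/Zscreeper/ss14-wega | Tools/localize/localize.py | _sanitize_yaml_string
-- ===== SOURCE A (Python) =====
-- def _sanitize_yaml_string(s: str, indent: str) -> str:
--     if not s:
--         return s
--     lines = s.split("\n")
--     res = [lines[0]]
--     for line in lines[1:]:
--         if line.strip() and not line.startswith(" ") and not line.startswith("\t"):
--             res.append(indent + line)
--         else:
--             res.append(line)
--     return "\n".join(res)
-- ===== SOURCE B (Python) =====
-- def _needs_indent(s: str, i: int) -> bool:
--     """Does the line starting at position i need indenting: it must not already
--     start with a space or tab, and must contain some non-whitespace character."""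
--     if i < len(s) and s[i] in " \t":
--         return False
--     while i < len(s) and s[i] != "\n":
--         if not s[i].isspace():
--             return True
--         i += 1
--     return False
--
--
-- def _sanitize_yaml_string(s: str, indent: str) -> str:
--     # One streaming pass over the characters: after each newline, peek at the
--     # upcoming line and insert the indent if it needs one. No line list is built.
--     out = []
--     for i, ch in enumerate(s):
--         out.append(ch)
--         if ch == "\n" and _needs_indent(s, i + 1):
--             out.append(indent)
--     return "".join(out)
-- ===== Notes on version B (the rewrite author's own statement) =====
-- stated objective: alternative
-- what changed: Replaces split('\n')/rebuild-line-list/join with a single streaming pass over the characters that, after each newline, peeks at the upcoming line and inserts the indent if it starts unindented and contains non-whitespace; no list of lines is ever built.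
import Mathlib
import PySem

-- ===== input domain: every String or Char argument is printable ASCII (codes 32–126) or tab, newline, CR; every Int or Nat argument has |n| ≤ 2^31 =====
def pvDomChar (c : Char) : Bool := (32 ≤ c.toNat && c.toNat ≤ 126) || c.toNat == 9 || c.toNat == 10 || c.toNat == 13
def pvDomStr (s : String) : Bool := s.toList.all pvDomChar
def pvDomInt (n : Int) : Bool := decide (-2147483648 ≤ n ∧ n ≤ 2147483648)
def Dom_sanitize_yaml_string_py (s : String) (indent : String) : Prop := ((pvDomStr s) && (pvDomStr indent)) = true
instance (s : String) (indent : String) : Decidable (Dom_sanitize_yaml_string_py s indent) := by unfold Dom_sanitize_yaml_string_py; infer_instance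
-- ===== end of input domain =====

-- B replaces A's split-into-lines / rebuild-list / join pipeline by one streaming
-- pass that inserts the indent right after each qualifying newline (objective:
-- alternative, same cost).

-- ===== PORT A =====
def sanitize_yaml_string_py (s : String) (indent : String) : String :=
  if s == "" then s
  else
    let lines := PySem.Chars.splitOn s.toList ['\n']
    let res := [lines.headD []]
    let res := res ++ (PySem.List.slice lines (some 1) none).map (fun line =>
      if (!(PySem.Chars.strip line).isEmpty && !PySem.Chars.startswith line [' ']
          && !PySem.Chars.startswith line ['\t'])
      then indent.toList ++ line else line)
    String.mk (PySem.Chars.join ['\n'] res)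

-- ===== PORT B =====
-- _needs_indent's while loop (scan the line for a non-whitespace char)
def pvHasContent : List Char → Bool
  | [] => false
  | c :: r => if c == '\n' then false else if !(PySem.Chars.isspace c) then true else pvHasContent r

-- _needs_indent(s, i) on the suffix s[i:]
def pvNeedsIndent : List Char → Bool
  | [] => pvHasContent []
  | c :: r => if c == ' ' || c == '\t' then false else pvHasContent (c :: r)

-- the main for-loop: copy each char, inserting indent after a qualifying newline
def pvSanGo (ind : List Char) : List Char → List Char
  | [] => []
  | c :: rest =>
      if c == '\n' && pvNeedsIndent rest then c :: (ind ++ pvSanGo ind rest)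
      else c :: pvSanGo ind rest

def sanitize_yaml_string_py_alt (s : String) (indent : String) : String :=
  String.mk (pvSanGo indent.toList s.toList)

-- ===== PRECONDITION & SPEC =====
def Spec_sanitize_yaml_string_py (s : String) (indent : String) (out : String) : Prop := out = sanitize_yaml_string_py_alt s indent
instance (s : String) (indent : String) (out : String) : Decidable (Spec_sanitize_yaml_string_py s indent out) := by unfold Spec_sanitize_yaml_string_py; infer_instance

-- ===== CLAIM (what is proved, stated in full; the proofs are below) =====
def Claim_equal_sanitize_yaml_string_py : Prop := ∀ (s : String) (indent : String), Dom_sanitize_yaml_string_py s indent → Spec_sanitize_yaml_string_py s indent (sanitize_yaml_string_py s indent)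

-- ===== LEMMAS AND PROOFS =====

-- the splitting of a char list at '\n', structurally
def splitNL : List Char → List (List Char)
  | [] => [[]]
  | c :: r =>
    if c = '\n' then [] :: splitNL r
    else match splitNL r with
         | [] => [[c]]
         | x :: xs => (c :: x) :: xs

def mapHd (g : List Char → List Char) : List (List Char) → List (List Char)
  | [] => []
  | x :: xs => g x :: xs

def hd0 : List (List Char) → List Char
  | [] => []
  | x :: _ => x

def lineHas (l : List Char) : Bool := l.any (fun c => !(c == ' ' || c == '\t' || c == '\r'))

def lineSU : List Char → Bool
  | [] => false
  | c :: _ => !(c == ' ' || c == '\t')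

def fLine (ind : List Char) (line : List Char) : List Char :=
  if (!(PySem.Chars.strip line).isEmpty && !PySem.Chars.startswith line [' ']
      && !PySem.Chars.startswith line ['\t'])
  then ind ++ line else line

def joined (ind : List Char) (cs : List Char) : List Char :=
  PySem.Chars.join ['\n'] (match splitNL cs with
    | [] => []
    | x :: xs => x :: xs.map (fLine ind))

lemma splitNL_ne_nil (cs : List Char) : splitNL cs ≠ [] := by
  cases cs with
  | nil => simp [splitNL]
  | cons c r =>
    simp only [splitNL]
    split
    · simp
    · cases h : splitNL r <;> simp

lemma splitOn_go_nl (fuel : Nat) (l cur : List Char) (acc : List (List Char))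
    (h : l.length < fuel) :
    PySem.Chars.splitOn.go ['\n'] fuel l cur acc =
      acc.reverse ++ mapHd (cur.reverse ++ ·) (splitNL l) := by
  induction fuel generalizing l cur acc with
  | zero => omega
  | succ f ih =>
    cases l with
    | nil => simp [PySem.Chars.splitOn.go, splitNL, mapHd]
    | cons c rest =>
      by_cases hc : c = '\n'
      · subst hc
        have hpre : List.isPrefixOf ['\n'] ('\n' :: rest) = true := by
          simp [List.isPrefixOf]
        rw [show PySem.Chars.splitOn.go ['\n'] (f+1) ('\n' :: rest) cur acc
              = PySem.Chars.splitOn.go ['\n'] f (List.drop (List.length ['\n']) ('\n' :: rest)) [] (cur.reverse :: acc) by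
            simp [PySem.Chars.splitOn.go, hpre]]
        rw [ih _ _ _ (by simpa using h)]
        cases hs : splitNL rest with
        | nil => exact absurd hs (splitNL_ne_nil rest)
        | cons x xs => simp [splitNL, hs, mapHd]
      · have hpre : List.isPrefixOf ['\n'] (c :: rest) = false := by
          simp [List.isPrefixOf]
          intro hh; exact absurd hh.symm hc
        rw [show PySem.Chars.splitOn.go ['\n'] (f+1) (c :: rest) cur acc
              = PySem.Chars.splitOn.go ['\n'] f rest (c :: cur) acc by
            simp [PySem.Chars.splitOn.go, hpre]]
        rw [ih _ _ _ (by simpa using h)]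
        cases hs : splitNL rest with
        | nil => exact absurd hs (splitNL_ne_nil rest)
        | cons x xs => simp [splitNL, hc, hs, mapHd]

lemma splitOn_nl (cs : List Char) : PySem.Chars.splitOn cs ['\n'] = splitNL cs := by
  rw [show PySem.Chars.splitOn cs ['\n'] = PySem.Chars.splitOn.go ['\n'] (cs.length + 1) cs [] [] from rfl]
  rw [splitOn_go_nl _ _ _ _ (by omega)]
  cases hs : splitNL cs with
  | nil => exact absurd hs (splitNL_ne_nil cs)
  | cons x xs => simp [mapHd]

lemma splitNL_chars (cs : List Char) :
    ∀ l ∈ splitNL cs, ∀ c ∈ l, c ∈ cs ∧ c ≠ '\n' := by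
  induction cs with
  | nil => intro l hl c hc; simp [splitNL] at hl; subst hl; simp at hc
  | cons a r ih =>
    intro l hl c hc
    by_cases ha : a = '\n'
    · subst ha
      simp only [splitNL, if_pos rfl] at hl
      rcases List.mem_cons.mp hl with h | h
      · subst h; simp at hc
      · have := ih l h c hc
        exact ⟨List.mem_cons_of_mem _ this.1, this.2⟩
    · simp only [splitNL, if_neg ha] at hl
      cases hs : splitNL r with
      | nil => exact absurd hs (splitNL_ne_nil r)
      | cons x xs =>
        rw [hs] at hl
        rcases List.mem_cons.mp hl with h | h
        · subst h
          rcases List.mem_cons.mp hc with h' | h'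
          · subst h'; exact ⟨List.mem_cons_self, ha⟩
          · have := ih x (by rw [hs]; exact List.mem_cons_self) c h'
            exact ⟨List.mem_cons_of_mem _ this.1, this.2⟩
        · have := ih l (by rw [hs]; exact List.mem_cons_of_mem _ h) c hc
          exact ⟨List.mem_cons_of_mem _ this.1, this.2⟩

lemma strip_eq_nil_iff (l : List Char) :
    PySem.Chars.strip l = [] ↔ ∀ c ∈ l, PySem.Chars.isspace c = true := by
  constructor
  · intro hemp c hc
    have hls : ∀ x ∈ PySem.Chars.lstrip l, PySem.Chars.isspace x = true := by
      intro x hx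
      unfold PySem.Chars.strip PySem.Chars.rstrip at hemp
      have hrev : List.dropWhile PySem.Chars.isspace (PySem.Chars.lstrip l).reverse = [] := by
        have := congrArg List.reverse hemp
        simpa using this
      rw [List.dropWhile_eq_nil_iff] at hrev
      exact hrev x (by simpa using hx)
    have hsplit := List.takeWhile_append_dropWhile (p := PySem.Chars.isspace) (l := l)
    rw [← hsplit] at hc
    rcases List.mem_append.mp hc with h | h
    · exact List.mem_takeWhile_imp h
    · exact hls c h
  · intro h
    have h1 : PySem.Chars.lstrip l = [] := by
      unfold PySem.Chars.lstrip
      rw [List.dropWhile_eq_nil_iff]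
      exact h
    unfold PySem.Chars.strip
    rw [h1]
    rfl

lemma strip_isEmpty (l : List Char) :
    (PySem.Chars.strip l).isEmpty = l.all PySem.Chars.isspace := by
  by_cases hh : PySem.Chars.strip l = []
  · rw [hh]
    show true = l.all PySem.Chars.isspace
    symm
    rw [List.all_eq_true]
    exact fun c hc => (strip_eq_nil_iff l).mp hh c hc
  · have h1 : (PySem.Chars.strip l).isEmpty = false := by
      simpa [List.isEmpty_iff] using hh
    rw [h1]
    symm
    rw [Bool.eq_false_iff]
    intro hall
    exact hh ((strip_eq_nil_iff l).mpr (List.all_eq_true.mp hall))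

lemma all_eq_not_any_not (l : List Char) (p : Char → Bool) :
    l.all p = !l.any (fun c => !p c) := by
  induction l with
  | nil => rfl
  | cons a t ih => simp [List.all_cons, List.any_cons, ih, Bool.not_or]

lemma char_beq_toNat (c d : Char) : (c == d) = decide (c.toNat = d.toNat) := by
  rw [Bool.eq_iff_iff]
  simp only [beq_iff_eq, decide_eq_true_eq]
  constructor
  · intro h; subst h; rfl
  · intro h
    exact Char.ext (UInt32.toNat_inj.mp h)

lemma isspace_dom (c : Char) (hc : pvDomChar c = true) (hn : c ≠ '\n') :
    PySem.Chars.isspace c = (c == ' ' || c == '\t' || c == '\r') := by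
  have hn10 : c.toNat ≠ 10 := by
    intro h10
    exact hn (Char.ext (UInt32.toNat_inj.mp h10))
  rw [char_beq_toNat c ' ', char_beq_toNat c '\t', char_beq_toNat c '\r']
  have e1 : (' ' : Char).toNat = 32 := rfl
  have e2 : ('\t' : Char).toNat = 9 := rfl
  have e3 : ('\r' : Char).toNat = 13 := rfl
  rw [e1, e2, e3]
  simp only [pvDomChar, Bool.or_eq_true, Bool.and_eq_true, decide_eq_true_eq, beq_iff_eq] at hc
  rw [Bool.eq_iff_iff]
  simp only [PySem.Chars.isspace, Bool.or_eq_true, Bool.and_eq_true, decide_eq_true_eq]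
  omega

lemma cond_eq (line : List Char) (h : ∀ c ∈ line, pvDomChar c = true ∧ c ≠ '\n') :
    (!(PySem.Chars.strip line).isEmpty && !PySem.Chars.startswith line [' ']
      && !PySem.Chars.startswith line ['\t']) = (lineHas line && lineSU line) := by
  rw [strip_isEmpty]
  have hall : line.all PySem.Chars.isspace = !lineHas line := by
    unfold lineHas
    rw [all_eq_not_any_not]
    congr 1
    induction line with
    | nil => rfl
    | cons a t ih =>
      have ha := h a List.mem_cons_self
      rw [List.any_cons, List.any_cons, isspace_dom a ha.1 ha.2,
          ih (fun c hc => h c (List.mem_cons_of_mem _ hc))]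
  rw [hall, Bool.not_not]
  cases line with
  | nil => simp [lineHas, lineSU, PySem.Chars.startswith, List.isPrefixOf]
  | cons c t =>
    have hsw : ∀ d : Char, PySem.Chars.startswith (c :: t) [d] = (c == d) := by
      intro d
      simp [PySem.Chars.startswith, List.isPrefixOf, BEq.comm]
    rw [hsw, hsw]
    simp only [lineSU]
    by_cases h1 : c = ' ' <;> by_cases h2 : c = '\t' <;>
      simp [h1, h2, Bool.and_comm, Bool.and_assoc, Bool.and_left_comm]

lemma join_cons_head (a x : List Char) (xs : List (List Char)) :
    PySem.Chars.join ['\n'] ((a ++ x) :: xs) = a ++ PySem.Chars.join ['\n'] (x :: xs) := by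
  cases xs with
  | nil => simp [PySem.Chars.join_singleton]
  | cons y ys => simp [PySem.Chars.join_cons_cons, List.append_assoc]

lemma join_cons_char (c : Char) (x : List Char) (xs : List (List Char)) :
    PySem.Chars.join ['\n'] ((c :: x) :: xs) = c :: PySem.Chars.join ['\n'] (x :: xs) := by
  have := join_cons_head [c] x xs
  simpa using this

lemma hd0_splitNL (cs : List Char) :
    hd0 (splitNL cs) = cs.takeWhile (fun c => !(c == '\n')) := by
  induction cs with
  | nil => simp [splitNL, hd0]
  | cons c r ih =>
    by_cases hc : c = '\n'
    · subst hc; simp [splitNL, hd0, List.takeWhile_cons]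
    · simp only [splitNL, if_neg hc]
      cases hs : splitNL r with
      | nil => exact absurd hs (splitNL_ne_nil r)
      | cons x xs =>
        rw [hs] at ih
        simp only [hd0] at ih ⊢
        simp [List.takeWhile_cons, hc, ← ih]

lemma hasContent_eq (cs : List Char) (hdom : ∀ c ∈ cs, pvDomChar c = true) :
    pvHasContent cs = lineHas (cs.takeWhile (fun c => !(c == '\n'))) := by
  induction cs with
  | nil => simp [pvHasContent, lineHas]
  | cons c r ih =>
    by_cases hc : c = '\n'
    · subst hc; simp [pvHasContent, lineHas, List.takeWhile_cons]
    · have hbeq : (c == '\n') = false := by simp [hc]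
      have hd := hdom c List.mem_cons_self
      rw [show pvHasContent (c :: r)
            = if !(PySem.Chars.isspace c) then true else pvHasContent r by
          simp [pvHasContent, hbeq]]
      rw [isspace_dom c hd hc]
      rw [List.takeWhile_cons]
      simp only [hbeq, Bool.not_false, if_pos trivial]
      rw [show lineHas (c :: r.takeWhile (fun c => !(c == '\n')))
            = (!(c == ' ' || c == '\t' || c == '\r') || lineHas (r.takeWhile (fun c => !(c == '\n')))) by
          simp [lineHas, List.any_cons]]
      rw [← ih (fun d hd' => hdom d (List.mem_cons_of_mem _ hd'))]
      by_cases hw : (c == ' ' || c == '\t' || c == '\r') = true <;> simp [hw] at * <;> simp [hw]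

lemma needsIndent_eq (cs : List Char) (hdom : ∀ c ∈ cs, pvDomChar c = true) :
    pvNeedsIndent cs = (lineHas (hd0 (splitNL cs)) && lineSU (hd0 (splitNL cs))) := by
  rw [hd0_splitNL]
  cases cs with
  | nil => simp [pvNeedsIndent, pvHasContent, lineHas, lineSU]
  | cons c r =>
    by_cases hc : c = '\n'
    · subst hc
      simp [pvNeedsIndent, pvHasContent, List.takeWhile_cons, lineHas, lineSU]
    · have hbeq : (c == '\n') = false := by simp [hc]
      rw [List.takeWhile_cons]
      simp only [hbeq, Bool.not_false, if_pos trivial]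
      by_cases hst : (c == ' ' || c == '\t') = true
      · rw [show pvNeedsIndent (c :: r) = false by simp [pvNeedsIndent, hst]]
        rw [show lineSU (c :: r.takeWhile (fun c => !(c == '\n'))) = false by
          simp only [lineSU]; simp [hst]]
        simp
      · rw [show pvNeedsIndent (c :: r) = pvHasContent (c :: r) by
          simp only [pvNeedsIndent]; rw [if_neg hst]]
        rw [show lineSU (c :: r.takeWhile (fun c => !(c == '\n'))) = true by
          simp only [lineSU]; simp at hst ⊢; tauto]
        rw [hasContent_eq (c :: r) hdom]
        rw [List.takeWhile_cons]
        simp [hbeq]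

lemma go_eq (ind : List Char) (cs : List Char)
    (hdom : ∀ c ∈ cs, pvDomChar c = true) :
    pvSanGo ind cs = joined ind cs := by
  induction cs with
  | nil => simp [pvSanGo, joined, splitNL, PySem.Chars.join_singleton]
  | cons c rest ih =>
    have hdomr : ∀ d ∈ rest, pvDomChar d = true := fun d hd => hdom d (List.mem_cons_of_mem _ hd)
    cases hs : splitNL rest with
    | nil => exact absurd hs (splitNL_ne_nil rest)
    | cons fl tl =>
      by_cases hc : c = '\n'
      · subst hc
        have hcond : (!(PySem.Chars.strip fl).isEmpty && !PySem.Chars.startswith fl [' ']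
            && !PySem.Chars.startswith fl ['\t']) = (lineHas fl && lineSU fl) := by
          apply cond_eq
          intro d hdm
          have := splitNL_chars rest fl (by rw [hs]; exact List.mem_cons_self) d hdm
          exact ⟨hdomr d this.1, this.2⟩
        have hsp : splitNL ('\n' :: rest) = [] :: fl :: tl := by
          simp [splitNL, hs]
        have hT : joined ind ('\n' :: rest) =
            '\n' :: (if lineHas fl && lineSU fl then ind ++ joined ind rest else joined ind rest) := by
          unfold joined
          rw [hsp, hs]
          simp only [List.map_cons]
          rw [show PySem.Chars.join ['\n'] ([] :: fLine ind fl :: tl.map (fLine ind))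
                = '\n' :: PySem.Chars.join ['\n'] (fLine ind fl :: tl.map (fLine ind)) by
              simp [PySem.Chars.join_cons_cons]]
          congr 1
          unfold fLine
          rw [hcond]
          split
          · rw [join_cons_head]
          · rfl
        rw [hT]
        have hni : pvNeedsIndent rest = (lineHas fl && lineSU fl) := by
          rw [needsIndent_eq rest hdomr, hs]; rfl
        rw [show pvSanGo ind ('\n' :: rest)
              = if (('\n' : Char) == '\n') && pvNeedsIndent rest
                then '\n' :: (ind ++ pvSanGo ind rest) else '\n' :: pvSanGo ind rest from rfl]
        rw [hni, ih hdomr]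
        by_cases hb : (lineHas fl && lineSU fl) = true <;> simp [hb]
      · have hbeq : (c == '\n') = false := by simp [hc]
        have hsp : splitNL (c :: rest) = (c :: fl) :: tl := by
          simp [splitNL, hc, hs]
        have hT : joined ind (c :: rest) = c :: joined ind rest := by
          unfold joined
          rw [hsp, hs]
          exact join_cons_char c fl (tl.map (fLine ind))
        rw [hT, ← ih hdomr]
        simp [pvSanGo, hbeq]

lemma joined_eq_A (s : String) (indent : String) (hs : ¬ s == "") :
    sanitize_yaml_string_py s indent = String.mk (joined indent.toList s.toList) := by
  unfold sanitize_yaml_string_py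
  rw [if_neg (by simpa using hs)]
  rw [splitOn_nl]
  cases h : splitNL s.toList with
  | nil => exact absurd h (splitNL_ne_nil _)
  | cons fl tl =>
    unfold joined
    rw [h]
    have hslice : PySem.List.slice (fl :: tl) (some 1) none = tl := by
      rw [PySem.List.slice_from _ (by norm_num : (0:Int) ≤ 1)]
      simp
    simp only [hslice, List.headD_cons]
    rfl

-- ===== VERDICT (by name: the statement is the Claim_ definition above) =====
theorem sanitize_yaml_string_py_spec : Claim_equal_sanitize_yaml_string_py := by
  intro s indent hdom
  unfold Spec_sanitize_yaml_string_py
  have hdoms : ∀ c ∈ s.toList, pvDomChar c = true := by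
    unfold Dom_sanitize_yaml_string_py pvDomStr at hdom
    simp only [Bool.and_eq_true, List.all_eq_true] at hdom
    exact hdom.1
  have hB : sanitize_yaml_string_py_alt s indent = String.mk (joined indent.toList s.toList) := by
    unfold sanitize_yaml_string_py_alt
    rw [go_eq indent.toList s.toList hdoms]
  by_cases hs : s == ""
  · have : s = "" := by simpa using hs
    subst this
    rw [hB]
    have h0 : joined indent.toList "".toList = [] := by
      simp [joined, splitNL, PySem.Chars.join_singleton]
    rw [h0]
    simp [sanitize_yaml_string_py]
    rw [String.mk]
    rfl
  · rw [hB, joined_eq_A s indent hs]
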